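-- pv_equiv track=rewrite | github.com/anujkhare/algorithms | solutions/strict_numbers.py | count_strict_numbers_recursive
-- ===== SOURCE A (Python) =====
-- MOD = 100007
--
-- def _count_strict_numbers_helper(num_digits, last_digit):
--     if num_digits == 0:
--         return 0
--
--     # because of the way we're calling recursively
--     if last_digit == -1 or last_digit == 10:
--         return 0
--
--     # base case
--     if num_digits == 1:
--         if last_digit == 0 or last_digit == 9:
--             return 1
--         return 2
--
--     sum = _count_strict_numbers_helper(num_digits - 1, last_digit + 1) % MOD + \
--         _count_strict_numbers_helper(num_digits - 1, last_digit - 1) % MOD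
--     return sum % MOD
--
-- def count_strict_numbers_recursive(num_digits):
--     if num_digits == 0:
--         return 0
--     if num_digits == 1:
--         return 9
--
--     # Numbers can only start with 1
--     return sum([
--         _count_strict_numbers_helper(num_digits - 1, ix)
--         for ix in range(1, 10)
--     ]) % MOD
-- ===== SOURCE B (Python) =====
-- MOD = 100007
--
-- def count_strict_numbers_recursive(num_digits):
--     if num_digits <= 0:
--         return 0
--     if num_digits == 1:
--         return 9
--     # f[d] = number of strict sequences of length k whose next-to-extend digit is d
--     f = [1, 2, 2, 2, 2, 2, 2, 2, 2, 1]
--     for _ in range(num_digits - 2):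
--         f = [((f[d - 1] if d > 0 else 0) + (f[d + 1] if d < 9 else 0)) % MOD
--              for d in range(10)]
--     return sum(f[1:10]) % MOD
-- ===== Notes on version B (the rewrite author's own statement) =====
-- stated objective: faster
-- what changed: Replaced the exponential two-way recursion over (num_digits, last_digit) with an iterative DP keeping a ten-entry vector of per-last-digit counts, updated once per extra digit; intended as faster (asymptotic): a timing run saw A time out at small sizes where B returns instantly, so no clean largest-size ratio could be read.
import Mathlib
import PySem

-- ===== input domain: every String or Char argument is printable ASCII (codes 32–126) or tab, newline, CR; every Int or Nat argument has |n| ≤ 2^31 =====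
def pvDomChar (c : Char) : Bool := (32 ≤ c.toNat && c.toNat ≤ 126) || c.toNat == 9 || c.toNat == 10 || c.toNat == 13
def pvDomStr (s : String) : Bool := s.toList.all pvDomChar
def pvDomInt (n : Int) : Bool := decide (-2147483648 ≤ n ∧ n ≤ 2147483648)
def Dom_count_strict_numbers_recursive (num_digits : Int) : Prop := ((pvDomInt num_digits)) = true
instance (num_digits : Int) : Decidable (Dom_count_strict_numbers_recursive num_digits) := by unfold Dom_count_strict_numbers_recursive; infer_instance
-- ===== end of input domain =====

-- B replaces A's exponential two-way recursion by an iterative 10-entry DP vector (return value only; neither mutates its argument).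

-- ===== PORT A =====
-- _count_strict_numbers_helper: recursion is on num_digits, which Python only ever
-- calls with nonnegative, strictly decreasing values; ported as structural recursion on Nat.
def pvHelperA : Nat → Int → Int
  | 0, _ => 0
  | Nat.succ n, last_digit =>
    if last_digit = -1 ∨ last_digit = 10 then 0
    else if n = 0 then (if last_digit = 0 ∨ last_digit = 9 then 1 else 2)
    else PySem.Int.mod (PySem.Int.mod (pvHelperA n (last_digit + 1)) 100007 +
          PySem.Int.mod (pvHelperA n (last_digit - 1)) 100007) 100007

def count_strict_numbers_recursive (num_digits : Int) : Int :=
  if num_digits = 0 then 0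
  else if num_digits = 1 then 9
  else PySem.Int.mod
    (((PySem.List.pyRange 1 10 1).map (fun ix => pvHelperA (num_digits - 1).toNat ix)).sum)
    100007

-- ===== PORT B =====
-- one DP step: f ↦ [((f[d-1] if d > 0 else 0) + (f[d+1] if d < 9 else 0)) % MOD for d in range(10)]
-- (indices d-1, d+1 are always in range here, so f[i] is ported as pyGetD with default 0 — exact)
def pvStepB (f : List Int) : List Int :=
  (PySem.List.pyRange 0 10 1).map (fun d =>
    PySem.Int.mod ((if 0 < d then PySem.List.pyGetD f (d - 1) 0 else 0) +
                   (if d < 9 then PySem.List.pyGetD f (d + 1) 0 else 0)) 100007)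

def count_strict_numbers_recursive_alt (num_digits : Int) : Int :=
  if num_digits ≤ 0 then 0
  else if num_digits = 1 then 9
  else
    let f := (PySem.List.pyRange 0 (num_digits - 2) 1).foldl (fun f _ => pvStepB f)
      [1, 2, 2, 2, 2, 2, 2, 2, 2, 1]
    PySem.Int.mod (PySem.List.slice f (some 1) (some 10)).sum 100007

-- ===== PRECONDITION & SPEC =====
-- Pre_ excludes the inputs on which A raises RecursionError instead of returning:
-- negative num_digits (the recursion never reaches a base case) and num_digits large
-- enough that the recursion's depth (about num_digits frames) overruns the interpreter's
-- recursion stack limit, where A raises before any value is produced.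
def Pre_count_strict_numbers_recursive (num_digits : Int) : Prop :=
  0 ≤ num_digits ∧ num_digits ≤ 9900
instance (num_digits : Int) : Decidable (Pre_count_strict_numbers_recursive num_digits) := by
  unfold Pre_count_strict_numbers_recursive; infer_instance

def pvWitness_count_strict_numbers_recursive : Int := 5

def Spec_count_strict_numbers_recursive (num_digits : Int) (out : Int) : Prop :=
  out = count_strict_numbers_recursive_alt num_digits
instance (num_digits : Int) (out : Int) : Decidable (Spec_count_strict_numbers_recursive num_digits out) := by
  unfold Spec_count_strict_numbers_recursive; infer_instance

-- ===== CLAIM (what is proved, stated in full; the proofs are below) =====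
def Claim_equal_count_strict_numbers_recursive : Prop := ∀ (num_digits : Int), Dom_count_strict_numbers_recursive num_digits → Pre_count_strict_numbers_recursive num_digits → Spec_count_strict_numbers_recursive num_digits (count_strict_numbers_recursive num_digits)

-- ===== LEMMAS AND PROOFS =====

-- the DP vector: pvHelperA k applied to each digit 0..9
def pvGvec (k : Nat) : List Int :=
  [pvHelperA k 0, pvHelperA k 1, pvHelperA k 2, pvHelperA k 3, pvHelperA k 4,
   pvHelperA k 5, pvHelperA k 6, pvHelperA k 7, pvHelperA k 8, pvHelperA k 9]

theorem pvHelperA_bounds (k : Nat) (d : Int) :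
    0 ≤ pvHelperA k d ∧ pvHelperA k d < 100007 := by
  induction k generalizing d with
  | zero => simp [pvHelperA]
  | succ n ih =>
    simp only [pvHelperA]
    split_ifs <;>
      first
        | omega
        | exact ⟨PySem.Int.mod_nonneg _ (by norm_num), PySem.Int.mod_lt _ (by norm_num)⟩

theorem pvMod_id (x : Int) (h0 : 0 ≤ x) (h1 : x < 100007) :
    PySem.Int.mod x 100007 = x := by
  rw [PySem.Int.mod_eq_emod_of_pos (by norm_num)]
  exact Int.emod_eq_of_lt h0 h1

theorem pvHelperA_rec (k : Nat) (d : Int) (hk : 1 ≤ k) :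
    pvHelperA (k + 1) d =
      if d = -1 ∨ d = 10 then 0
      else PySem.Int.mod (pvHelperA k (d + 1) + pvHelperA k (d - 1)) 100007 := by
  simp only [pvHelperA]
  have hne : ¬ k = 0 := by omega
  rw [if_neg hne]
  have b1 := pvHelperA_bounds k (d + 1)
  have b2 := pvHelperA_bounds k (d - 1)
  rw [pvMod_id _ b1.1 b1.2, pvMod_id _ b2.1 b2.2]

theorem pvHelperA_neg_one (k : Nat) (hk : 1 ≤ k) : pvHelperA k (-1) = 0 := by
  obtain ⟨m, rfl⟩ : ∃ m, k = m + 1 := ⟨k - 1, by omega⟩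
  simp [pvHelperA]

theorem pvHelperA_ten (k : Nat) (hk : 1 ≤ k) : pvHelperA k 10 = 0 := by
  obtain ⟨m, rfl⟩ : ∃ m, k = m + 1 := ⟨k - 1, by omega⟩
  simp [pvHelperA]

set_option maxHeartbeats 1600000 in
theorem pvStepB_gvec (k : Nat) (hk : 1 ≤ k) : pvStepB (pvGvec k) = pvGvec (k + 1) := by
  have h9 : pvHelperA k (-1) = 0 := pvHelperA_neg_one k hk
  have h10 : pvHelperA k 10 = 0 := pvHelperA_ten k hk
  have key : ∀ d : Int, ¬(d = -1 ∨ d = 10) →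
      pvHelperA (k + 1) d = (pvHelperA k (d + 1) + pvHelperA k (d - 1)) % 100007 :=
    fun d h => by
      rw [pvHelperA_rec k d hk, if_neg h, PySem.Int.mod_eq_emod_of_pos (by norm_num)]
  have hr : PySem.List.pyRange 0 10 1 = [0, 1, 2, 3, 4, 5, 6, 7, 8, 9] := by decide
  simp only [pvStepB, hr, List.map_cons, List.map_nil, pvGvec]
  norm_num
  refine ⟨?_, ?_, ?_, ?_, ?_, ?_, ?_, ?_, ?_, ?_⟩ <;>
    (rw [key _ (by norm_num)]; simp [pysem]; norm_num [h9, h10, Int.add_comm])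

theorem pvIter_gvec (m : Nat) : pvStepB^[m] (pvGvec 1) = pvGvec (m + 1) := by
  induction m with
  | zero => rfl
  | succ n ih =>
    rw [Function.iterate_succ_apply', ih, pvStepB_gvec (n + 1) (by omega)]

theorem pvFoldl_iter (l : List Int) (f0 : List Int) :
    l.foldl (fun f _ => pvStepB f) f0 = pvStepB^[l.length] f0 := by
  induction l generalizing f0 with
  | nil => rfl
  | cons x xs ih => simp [List.foldl_cons, ih, Function.iterate_succ_apply]

-- ===== VERDICT (by name: the statement is the Claim_ definition above) =====
theorem count_strict_numbers_recursive_spec : Claim_equal_count_strict_numbers_recursive := by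
  intro n hdom hpre
  unfold Spec_count_strict_numbers_recursive
  unfold count_strict_numbers_recursive count_strict_numbers_recursive_alt
  by_cases hz : n = 0
  · subst hz; norm_num
  · by_cases ho : n = 1
    · subst ho; norm_num
    · have h2 : 2 ≤ n := by
        have := hpre; unfold Pre_count_strict_numbers_recursive at this; omega
      rw [if_neg hz, if_neg ho, if_neg (by omega : ¬ n ≤ 0), if_neg ho]
      have hlen : (PySem.List.pyRange 0 (n - 2) 1).length = (n - 2).toNat := by
        rw [PySem.List.length_pyRange_one]; norm_num
      have hinit : ([1, 2, 2, 2, 2, 2, 2, 2, 2, 1] : List Int) = pvGvec 1 := by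
        simp [pvGvec, pvHelperA]
      rw [hinit, pvFoldl_iter, hlen, pvIter_gvec]
      have hm : (n - 1).toNat = (n - 2).toNat + 1 := by omega
      rw [hm]
      have hr : PySem.List.pyRange 1 10 1 = [1, 2, 3, 4, 5, 6, 7, 8, 9] := by decide
      rw [hr]
      simp [pvGvec, PySem.List.slice]
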